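-- pv_equiv track=rewrite | github.com/fp-computer-programming/start-s2-labs-p22yxi | Start-S2-Labs-4.py | double_every_other
-- ===== SOURCE A (Python) =====
-- def double_every_other(lst):
--     x = []
--     # A new empty list is used to place the results
--     for i in range(len(lst)):
--         if i % 2 != 0:
--         # Select the number in the even position
--             x.append(lst[i] * 2)
--         # The number in the even digits is multiplied by two
--         # and added to the list that will be the result
--         else:
--             x.append(lst[i])
--         # Numbers in odd positions are added directly to the resulting list
--     return x
-- ===== SOURCE B (Python) =====
-- def double_every_other(lst):
--     x = list(lst)
--     x[1::2] = [v * 2 for v in x[1::2]]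
--     return x
-- ===== Notes on version B (the rewrite author's own statement) =====
-- stated objective: idiomatic
-- what changed: Instead of an index loop with an if/else appending element by element, B copies the list and rewrites only the odd-index stride via slice assignment x[1::2] = [v*2 for v in x[1::2]].
import Mathlib
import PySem

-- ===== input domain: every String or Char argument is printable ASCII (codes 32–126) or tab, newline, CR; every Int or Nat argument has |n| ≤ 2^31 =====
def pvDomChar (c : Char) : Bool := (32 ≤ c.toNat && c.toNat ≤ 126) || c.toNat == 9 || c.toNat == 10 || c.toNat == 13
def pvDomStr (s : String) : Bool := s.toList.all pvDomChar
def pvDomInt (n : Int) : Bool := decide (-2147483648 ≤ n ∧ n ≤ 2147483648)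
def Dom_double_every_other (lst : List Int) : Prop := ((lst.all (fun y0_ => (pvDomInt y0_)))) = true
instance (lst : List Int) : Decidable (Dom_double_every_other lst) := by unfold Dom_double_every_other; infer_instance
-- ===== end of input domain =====

-- B rewrites only the odd-index stride of a copy via slice assignment, instead of A's index loop with an if/else append; same values everywhere.
-- ===== PORT A =====
def double_every_other (lst : List Int) : List Int :=
  (PySem.List.pyRange 0 (PySem.List.len lst) 1).foldl
    (fun x i =>
      if PySem.Int.mod i 2 ≠ 0 then
        x ++ [PySem.List.pyGetD lst i 0 * 2]   -- lst[i] is always in range here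
      else
        x ++ [PySem.List.pyGetD lst i 0])
    []

-- ===== PORT B =====
-- x[1::2] : every second element starting from index 1
def pvStrideOdd : List Int → List Int
  | [] => []
  | [_] => []
  | _ :: b :: t => b :: pvStrideOdd t

-- x[1::2] = ys : replace the odd-index stride of x by ys (lengths always match here)
def pvAssignOdd : List Int → List Int → List Int
  | [], _ => []
  | [a], _ => [a]
  | a :: b :: t, [] => a :: b :: pvAssignOdd t []
  | a :: _ :: t, y :: ys => a :: y :: pvAssignOdd t ys

def double_every_other_alt (lst : List Int) : List Int :=
  pvAssignOdd lst ((pvStrideOdd lst).map (fun v => v * 2))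

-- ===== PRECONDITION & SPEC =====
def Spec_double_every_other (lst : List Int) (out : List Int) : Prop := out = double_every_other_alt lst
instance (lst : List Int) (out : List Int) : Decidable (Spec_double_every_other lst out) := by unfold Spec_double_every_other; infer_instance

-- ===== CLAIM (what is proved, stated in full; the proofs are below) =====
def Claim_equal_double_every_other : Prop := ∀ (lst : List Int), Dom_double_every_other lst → Spec_double_every_other lst (double_every_other lst)

-- ===== LEMMAS AND PROOFS =====

-- canonical two-at-a-time form both ports are reduced to
def pvCore : List Int → List Int
  | [] => []
  | [a] => [a]
  | a :: b :: t => a :: b * 2 :: pvCore t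

lemma alt_eq_core (lst : List Int) : double_every_other_alt lst = pvCore lst := by
  induction lst using pvCore.induct with
  | case1 => rfl
  | case2 a => rfl
  | case3 a b t ih =>
      simp only [double_every_other_alt, pvStrideOdd, pvAssignOdd, List.map, pvCore] at *
      rw [ih]

lemma range_map_eq_core (t : List Int) :
    (List.range t.length).map
      (fun (k : Nat) => if PySem.Int.mod (k : Int) 2 ≠ 0 then t.getD k 0 * 2 else t.getD k 0)
      = pvCore t := by
  induction t using pvCore.induct with
  | case1 => rfl
  | case2 a => simp [pvCore]
  | case3 a b t ih =>
      have hmod : ∀ k : Nat, PySem.Int.mod ((k + 2 : Nat) : Int) 2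
          = PySem.Int.mod (k : Int) 2 := by
        intro k
        rw [PySem.Int.mod_eq_emod_of_pos (by omega : (0:Int) < 2),
          PySem.Int.mod_eq_emod_of_pos (by omega : (0:Int) < 2)]
        push_cast
        omega
      simp only [pvCore]
      rw [show (a :: b :: t).length = t.length + 1 + 1 from rfl,
        List.range_succ_eq_map, List.range_succ_eq_map]
      simp only [List.map_cons, List.map_map]
      have hh1 : (if PySem.Int.mod ((Nat.succ 0 : Nat) : Int) 2 ≠ 0
          then (a :: b :: t).getD (Nat.succ 0) 0 * 2
          else (a :: b :: t).getD (Nat.succ 0) 0) = b * 2 := by simp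
      have hh0 : (if PySem.Int.mod ((0 : Nat) : Int) 2 ≠ 0
          then (a :: b :: t).getD 0 0 * 2
          else (a :: b :: t).getD 0 0) = a := by simp
      rw [hh0, hh1, ← ih]
      congr 2
      apply List.map_congr_left
      intro k _
      have e : Nat.succ (Nat.succ k) = k + 2 := rfl
      simp only [Function.comp_apply, e, hmod k]
      rfl

lemma a_eq_core (lst : List Int) : double_every_other lst = pvCore lst := by
  have hbody :
      (fun (x : List Int) (i : Int) =>
        if PySem.Int.mod i 2 ≠ 0 then x ++ [PySem.List.pyGetD lst i 0 * 2]
        else x ++ [PySem.List.pyGetD lst i 0])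
      = fun x i => x ++ [if PySem.Int.mod i 2 ≠ 0 then PySem.List.pyGetD lst i 0 * 2
          else PySem.List.pyGetD lst i 0] := by
    funext x i
    exact (apply_ite (fun z => x ++ [z]) _ _ _).symm
  rw [double_every_other, hbody, PySem.List.foldl_append_singleton_eq_map,
    List.nil_append, PySem.List.len_eq, PySem.List.pyRange_one, List.map_map,
    ← range_map_eq_core]
  simp only [Int.sub_zero, Int.toNat_natCast]
  apply List.map_congr_left
  intro k _
  simp [Function.comp, PySem.List.pyGetD_natCast]

-- ===== VERDICT (by name: the statement is the Claim_ definition above) =====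
theorem double_every_other_spec : Claim_equal_double_every_other := by
  intro lst _
  show double_every_other lst = double_every_other_alt lst
  rw [a_eq_core, alt_eq_core]
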